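-- pv_equiv track=rewrite | github.com/Pratinav-Shrivastava/codeforces | Random/A_False_Alarm.py | false_alarm
-- ===== SOURCE A (Python) =====
-- def false_alarm(n, x, doors):
--     l, r = float("inf"), -1
--     for i in range(n):
--         door = doors[i]
--         if door == 1:
--             l = min(l, i)
--             r = max(r, i)
--     return("YES" if x >= r-l+1 else "NO")
-- ===== SOURCE B (Python) =====
-- def false_alarm(n, x, doors):
--     prefix = doors[:max(n, 0)]
--     lead = 0
--     for d in prefix:
--         if d == 1:
--             break
--         lead += 1
--     else:
--         return "YES"
--     trail = 0
--     for d in reversed(prefix):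
--         if d == 1:
--             break
--         trail += 1
--     return "YES" if x >= len(prefix) - lead - trail else "NO"
-- ===== Notes on version B (the rewrite author's own statement) =====
-- stated objective: alternative
-- what changed: B slices the first n doors and measures the leading and trailing zero margins with early-exit scans from each end (span = n - lead - trail), instead of A's full pass maintaining running min/max indices of 1s.
import Mathlib
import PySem

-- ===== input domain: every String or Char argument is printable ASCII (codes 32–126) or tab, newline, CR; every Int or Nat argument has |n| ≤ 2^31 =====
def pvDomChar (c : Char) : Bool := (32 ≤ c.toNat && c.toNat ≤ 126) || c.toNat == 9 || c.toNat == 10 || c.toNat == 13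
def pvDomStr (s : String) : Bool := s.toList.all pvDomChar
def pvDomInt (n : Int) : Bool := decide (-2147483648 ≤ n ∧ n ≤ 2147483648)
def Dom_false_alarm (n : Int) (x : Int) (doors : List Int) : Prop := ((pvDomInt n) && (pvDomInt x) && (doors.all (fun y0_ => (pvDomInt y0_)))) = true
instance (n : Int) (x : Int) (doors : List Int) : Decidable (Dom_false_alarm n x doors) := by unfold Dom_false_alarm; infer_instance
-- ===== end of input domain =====

-- B measures the leading/trailing zero margins of the first n doors (span = n - lead - trail)
-- instead of A's full scan maintaining running min/max indices of 1s; alternative decomposition.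


-- ===== PORT A =====
-- l = float('inf') is modeled as Option Int (none = +inf); when l = none the Python comparison
-- x >= r - inf + 1 = -inf is always True, hence "YES". Pre_ guarantees every doors[i] is in range,
-- so pyGetD with default 0 is exact.
def false_alarm (n : Int) (x : Int) (doors : List Int) : String :=
  let st := (PySem.List.pyRange 0 n 1).foldl
    (fun (lr : Option Int × Int) i =>
      let door := PySem.List.pyGetD doors i 0
      if door == 1 then
        ((match lr.1 with | none => some i | some l => some (min l i)), max lr.2 i)
      else lr)
    (none, -1)
  match st.1 with
  | none => "YES"
  | some l => if x ≥ st.2 - l + 1 then "YES" else "NO"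

-- ===== PORT B =====
-- counts the elements before the first 1 (the for-loop with break/else of Source B); none = no 1 found
def countToOne : List Int → Option Int
  | [] => none
  | d :: rest => if d == 1 then some 0 else (countToOne rest).map (· + 1)

-- doors[:max(n,0)] with a nonnegative bound is exactly List.take
def false_alarm_alt (n : Int) (x : Int) (doors : List Int) : String :=
  let pfx := doors.take (max n 0).toNat
  match countToOne pfx with
  | none => "YES"
  | some lead =>
    let trail := (countToOne pfx.reverse).getD 0
    if x ≥ (pfx.length : Int) - lead - trail then "YES" else "NO"

-- ===== PRECONDITION & SPEC =====
-- Pre_ excludes exactly the inputs where A raises IndexError (it reads doors[i] for i < n).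
def Pre_false_alarm (n : Int) (x : Int) (doors : List Int) : Prop := n ≤ (doors.length : Int)
instance (n : Int) (x : Int) (doors : List Int) : Decidable (Pre_false_alarm n x doors) := by unfold Pre_false_alarm; infer_instance
def pvWitness_false_alarm : Int × Int × List Int := (4, 2, [0, 1, 1, 0])

def Spec_false_alarm (n : Int) (x : Int) (doors : List Int) (out : String) : Prop := out = false_alarm_alt n x doors
instance (n : Int) (x : Int) (doors : List Int) (out : String) : Decidable (Spec_false_alarm n x doors out) := by unfold Spec_false_alarm; infer_instance

-- ===== CLAIM (what is proved, stated in full; the proofs are below) =====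
def Claim_equal_false_alarm : Prop := ∀ (n : Int) (x : Int) (doors : List Int), Dom_false_alarm n x doors → Pre_false_alarm n x doors → Spec_false_alarm n x doors (false_alarm n x doors)

-- ===== LEMMAS AND PROOFS =====

-- index of the last 1 in p (or -1), expressed through countToOne of the reverse
def lastOne (p : List Int) : Int :=
  match countToOne p.reverse with
  | none => -1
  | some t => (p.length : Int) - 1 - t

theorem countToOne_none_iff (p : List Int) : countToOne p = none ↔ 1 ∉ p := by
  induction p with
  | nil => simp [countToOne]
  | cons d rest ih =>
    simp only [countToOne, List.mem_cons]
    by_cases h : d = 1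
    · simp [h]
    · simp only [beq_iff_eq, if_neg h, Option.map_eq_none_iff, ih]
      constructor
      · intro hr hor
        rcases hor with h1 | h1
        · exact h h1.symm
        · exact hr h1
      · intro hn h1
        exact hn (Or.inr h1)

theorem countToOne_append_one (p : List Int) (a : Int) :
    countToOne (p ++ [a]) =
      match countToOne p with
      | some l => some l
      | none => if a == 1 then some (p.length : Int) else none := by
  induction p with
  | nil => simp [countToOne]
  | cons d rest ih =>
    by_cases h : d = 1
    · simp [countToOne, h]
    · rw [List.cons_append]
      simp only [countToOne, beq_iff_eq, if_neg h, ih]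
      cases hc : countToOne rest with
      | some l => simp
      | none =>
        by_cases ha : a = 1 <;> simp [ha]

-- a first-1 index is in [0, length)
theorem countToOne_bounds (q : List Int) (l : Int) (h : countToOne q = some l) :
    0 ≤ l ∧ l < (q.length : Int) := by
  induction q generalizing l with
  | nil => simp [countToOne] at h
  | cons d rest ih =>
    simp only [countToOne] at h
    by_cases h1 : d = 1
    · rw [if_pos (by simpa using h1)] at h
      obtain rfl : (0 : Int) = l := Option.some.inj h
      refine ⟨le_refl 0, ?_⟩
      show (0 : Int) < ((d :: rest).length : Int)
      simp
    · rw [if_neg (by simpa using h1)] at h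
      cases hc : countToOne rest with
      | none => rw [hc] at h; simp at h
      | some l' =>
        rw [hc] at h
        simp only [Option.map_some] at h
        have hll : l = l' + 1 := (Option.some.inj h).symm
        subst hll
        have := ih l' hc
        simp only [List.length_cons]
        push_cast
        omega

theorem lastOne_bounds (p : List Int) : -1 ≤ lastOne p ∧ lastOne p < (p.length : Int) := by
  unfold lastOne
  cases hc : countToOne p.reverse with
  | none =>
    refine ⟨le_refl _, ?_⟩
    show (-1 : Int) < (p.length : Int)
    have : (0 : Int) ≤ (p.length : Int) := by positivity
    omega
  | some t =>
    have := countToOne_bounds _ _ hc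
    simp only [List.length_reverse] at this
    simp
    omega

-- A's fold over range(k) computes (index of first 1, index of last 1 or -1) of take k doors
theorem foldA_eq (doors : List Int) (k : Nat) (hk : k ≤ doors.length) :
    (PySem.List.pyRange 0 (k : Int) 1).foldl
      (fun (lr : Option Int × Int) i =>
        let door := PySem.List.pyGetD doors i 0
        if door == 1 then
          ((match lr.1 with | none => some i | some l => some (min l i)), max lr.2 i)
        else lr)
      (none, -1)
    = (countToOne (doors.take k), lastOne (doors.take k)) := by
  induction k with
  | zero => simp [countToOne, lastOne]
  | succ k ih =>
    have hk' : k ≤ doors.length := Nat.le_of_succ_le hk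
    have hklt : k < doors.length := hk
    have hrange : PySem.List.pyRange 0 ((k : Int) + 1) 1
        = PySem.List.pyRange 0 (k : Int) 1 ++ [(k : Int)] := by
      have := PySem.List.pyRange_one_succ_right (a := 0) (b := (k : Int)) (by omega)
      simpa using this
    have htake : doors.take (k + 1) = doors.take k ++ [doors[k]] :=
      List.take_succ_eq_append_getElem hklt
    have hget : PySem.List.pyGetD doors (k : Int) 0 = doors[k] :=
      PySem.List.pyGetD_ofNat (xs := doors) k 0 hklt
    have hlen : (doors.take k).length = k := List.length_take_of_le hk'
    have hrevcons : ∀ a : Int, (doors.take k ++ [a]).reverse = a :: (doors.take k).reverse := by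
      intro a; simp
    push_cast
    rw [hrange, List.foldl_append, ih hk', htake, List.foldl_cons, List.foldl_nil]
    simp only [hget]
    by_cases hd : doors[k] = 1
    · simp only [hd, beq_self_eq_true, if_true, Prod.mk.injEq]
      constructor
      · rw [countToOne_append_one]
        cases hc : countToOne (doors.take k) with
        | none => simp [hlen]
        | some l =>
          have hb := countToOne_bounds _ _ hc
          rw [hlen] at hb
          simp [min_eq_left (by omega : l ≤ (k : Int))]
      · have hb := lastOne_bounds (doors.take k)
        rw [hlen] at hb
        have hval : lastOne (doors.take k ++ [1]) = (k : Int) := by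
          unfold lastOne
          rw [hrevcons 1]
          simp only [countToOne, beq_self_eq_true, if_true, List.length_append,
            List.length_cons, List.length_nil, hlen]
          push_cast
          ring
        rw [hval]
        exact max_eq_right (by omega)
    · rw [if_neg (by simp [hd])]
      simp only [Prod.mk.injEq]
      constructor
      · rw [countToOne_append_one]
        cases hc : countToOne (doors.take k) with
        | none => simp [hd]
        | some l => simp
      · unfold lastOne
        rw [hrevcons doors[k]]
        simp only [countToOne, beq_iff_eq, if_neg hd]
        cases hc : countToOne (doors.take k).reverse with
        | none => simp
        | some t =>
          simp only [Option.map_some, List.length_append, List.length_cons,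
            List.length_nil, hlen]
          push_cast
          ring

-- ===== VERDICT (by name: the statement is the Claim_ definition above) =====
theorem false_alarm_spec : Claim_equal_false_alarm := by
  intro n x doors _hdom hpre
  unfold Spec_false_alarm false_alarm false_alarm_alt
  by_cases hn : 0 ≤ n
  · have hmax : max n 0 = n := max_eq_left hn
    have hk : n.toNat ≤ doors.length := by
      unfold Pre_false_alarm at hpre; omega
    have hcast : (n.toNat : Int) = n := Int.toNat_of_nonneg hn
    rw [hmax]
    rw [show PySem.List.pyRange 0 n 1 = PySem.List.pyRange 0 (n.toNat : Int) 1 by rw [hcast]]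
    rw [foldA_eq doors n.toNat hk]
    cases hc : countToOne (doors.take n.toNat) with
    | none => simp [hc]
    | some l =>
      have hmem : (1 : Int) ∈ doors.take n.toNat := by
        by_contra h
        rw [(countToOne_none_iff _).mpr h] at hc
        simp at hc
      cases hcr : countToOne (doors.take n.toNat).reverse with
      | none =>
        exact absurd ((countToOne_none_iff _).mp hcr) (by simpa using hmem)
      | some t =>
        simp only [hc, hcr, lastOne, Option.getD_some]
        have harith : ((doors.take n.toNat).length : Int) - 1 - t - l + 1
            = ((doors.take n.toNat).length : Int) - l - t := by ring
        rw [harith]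
  · -- n < 0: range(n) is empty and doors[:max(n,0)] = []
    have h1 : PySem.List.pyRange 0 n 1 = [] := by
      simp [PySem.List.pyRange]; omega
    have h2 : (max n 0).toNat = 0 := by omega
    rw [h1, h2]
    simp [countToOne]
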